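-- pv_equiv track=rewrite | github.com/CodeBoarding/CodeBoarding | tests/integration/generate_scaled_javascript_project.py | rewrite_js_file
-- ===== SOURCE A (Python) =====
-- PACKAGES = ["models", "services", "utils", "unused"]
--
-- _width = 2
--
-- def sfx(i: int) -> str:
--     return f"_{i:0{_width}d}"
--
-- def rewrite_js_file(filepath: str, i: int) -> str:
--     """Rewrite a source file path for copy i.
--
--     src/index.js       → src/entry_00.js
--     src/models/base.js → src/models_00/base.js
--     """
--     s = sfx(i)
--
--     if filepath == "src/index.js":
--         return f"src/entry{s}.js"
--
--     for pkg in PACKAGES: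
--         prefix = f"src/{pkg}/"
--         if filepath.startswith(prefix):
--             return f"src/{pkg}{s}/{filepath[len(prefix):]}"
--
--     return filepath
-- ===== SOURCE B (Python) =====
-- PACKAGES = ["models", "services", "utils", "unused"]
--
-- _width = 2
--
-- def rewrite_js_file(filepath: str, i: int) -> str:
--     """Rewrite a source file path for copy i (single-parse variant)."""
--     s = "_" + str(i).zfill(_width)
--
--     if filepath == "src/index.js":
--         return f"src/entry{s}.js"
--
--     parts = filepath.split("/")
--     if len(parts) >= 3 and parts[0] == "src" and parts[1] in set(PACKAGES):
--         return f"src/{parts[1]}{s}/" + "/".join(parts[2:])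
--
--     return filepath
-- ===== Notes on version B (the rewrite author's own statement) =====
-- stated objective: idiomatic
-- what changed: B parses the path once with split('/') and tests the package segment against a set, rebuilding the tail with join, instead of A's loop over PACKAGES testing startswith on a freshly built prefix for each package.
import Mathlib
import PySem

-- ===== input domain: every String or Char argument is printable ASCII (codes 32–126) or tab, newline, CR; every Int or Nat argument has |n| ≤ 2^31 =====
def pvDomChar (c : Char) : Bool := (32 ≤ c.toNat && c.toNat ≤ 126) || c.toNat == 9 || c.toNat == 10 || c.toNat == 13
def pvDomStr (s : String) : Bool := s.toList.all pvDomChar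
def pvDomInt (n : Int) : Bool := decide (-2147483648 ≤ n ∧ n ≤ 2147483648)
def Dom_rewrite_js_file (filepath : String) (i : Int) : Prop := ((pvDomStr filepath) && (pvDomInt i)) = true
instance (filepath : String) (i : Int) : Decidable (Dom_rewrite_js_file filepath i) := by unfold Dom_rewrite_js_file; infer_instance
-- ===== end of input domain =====

-- B rewrites the path by parsing it once (split('/'), set membership, join) instead of A's
-- loop over PACKAGES testing startswith on a freshly built prefix per package; objective: idiomatic.

-- ===== PORT A =====
def PACKAGES : List String := ["models", "services", "utils", "unused"]

-- f"_{i:0{2}d}" on an int equals "_" + str(i).zfill(2) (zero-pad, sign kept in front): exact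
def sfx (i : Int) : String := "_" ++ PySem.Str.zfill (PySem.Int.toStr i) 2

def pkgLoop (filepath s : String) : List String → String
  | [] => filepath
  | pkg :: rest =>
    let pfx := "src/" ++ pkg ++ "/"
    if PySem.Str.startswith filepath pfx then
      "src/" ++ pkg ++ s ++ "/" ++ PySem.Str.slice filepath (some (PySem.Str.len pfx)) none
    else pkgLoop filepath s rest

def rewrite_js_file (filepath : String) (i : Int) : String :=
  let s := sfx i
  if filepath == "src/index.js" then "src/entry" ++ s ++ ".js"
  else pkgLoop filepath s PACKAGES

-- ===== PORT B =====
-- Source B: parts = filepath.split('/'); the guarded parts[0]/parts[1] are ported as getD (the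
-- guard 3 ≤ len parts makes them in range); str.split('/') is List.splitOn on the code points.
def rewrite_js_file_alt (filepath : String) (i : Int) : String :=
  let s := "_" ++ PySem.Str.zfill (PySem.Int.toStr i) 2
  if filepath == "src/index.js" then "src/entry" ++ s ++ ".js"
  else
    let parts := filepath.toList.splitOn '/'
    let pkgSet : PySem.Set (List Char) :=
      PySem.Set.ofList ["models".toList, "services".toList, "utils".toList, "unused".toList]
    if 3 ≤ parts.length ∧ parts.getD 0 [] = "src".toList ∧ parts.getD 1 [] ∈ pkgSet then
      "src/" ++ String.ofList (parts.getD 1 []) ++ s ++ "/"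
        ++ String.ofList (List.intercalate ['/'] (parts.drop 2))
    else filepath

-- ===== PRECONDITION & SPEC =====
def Spec_rewrite_js_file (filepath : String) (i : Int) (out : String) : Prop := out = rewrite_js_file_alt filepath i
instance (filepath : String) (i : Int) (out : String) : Decidable (Spec_rewrite_js_file filepath i out) := by unfold Spec_rewrite_js_file; infer_instance

-- ===== CLAIM (what is proved, stated in full; the proofs are below) =====
def Claim_equal_rewrite_js_file : Prop := ∀ (filepath : String) (i : Int), Dom_rewrite_js_file filepath i → Spec_rewrite_js_file filepath i (rewrite_js_file filepath i)

-- ===== LEMMAS AND PROOFS =====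

-- the prefix shape "src/<p>/<t>" on code points
def pvShape (fp : String) (p : String) (t : List Char) : Prop :=
  fp.toList = ['s', 'r', 'c', '/'] ++ p.toList ++ '/' :: t

lemma pv_noSlash_eq : ∀ (a : List Char) (b x y : List Char), '/' ∉ a → '/' ∉ b →
    a ++ '/' :: x = b ++ '/' :: y → a = b ∧ x = y := by
  intro a
  induction a with
  | nil =>
    intro b x y _ hb h
    cases b with
    | nil => simpa using h
    | cons d bs =>
      simp only [List.nil_append, List.cons_append, List.cons.injEq] at h
      exact absurd (h.1 ▸ List.mem_cons_self ..) hb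
  | cons c as ih =>
    intro b x y ha hb h
    cases b with
    | nil =>
      simp only [List.cons_append, List.nil_append, List.cons.injEq] at h
      exact absurd (h.1 ▸ List.mem_cons_self ..) ha
    | cons d bs =>
      simp only [List.cons_append, List.cons.injEq] at h
      obtain ⟨h1, h2⟩ := h
      have := ih bs x y (fun hm => ha (List.mem_cons_of_mem _ hm)) (fun hm => hb (List.mem_cons_of_mem _ hm)) h2
      exact ⟨by rw [h1, this.1], this.2⟩

lemma pv_splitOn_eq (xs : List Char) : xs.splitOn '/' = xs.splitOnP (· == '/') := rfl

lemma pv_splitOn_noSlash_append (seg rest : List Char) (h : '/' ∉ seg) :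
    (seg ++ '/' :: rest).splitOn '/' = seg :: rest.splitOn '/' := by
  induction seg with
  | nil => simp [pv_splitOn_eq, List.splitOnP_cons]
  | cons c cs ih =>
    have hc : (c == '/') = false := by
      simp only [List.mem_cons, not_or] at h
      exact beq_eq_false_iff_ne.mpr (fun hcc => h.1 hcc.symm)
    have ih' := ih (fun hm => h (List.mem_cons_of_mem _ hm))
    simp only [pv_splitOn_eq, List.cons_append, List.splitOnP_cons, hc, if_neg Bool.false_ne_true] at *
    rw [ih']
    rfl

lemma pv_intercalate_cons (a : List Char) (l : List (List Char)) (h : l ≠ []) :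
    List.intercalate ['/'] (a :: l) = a ++ '/' :: List.intercalate ['/'] l := by
  cases l with
  | nil => exact absurd rfl h
  | cons b bs => simp [List.intercalate, List.intersperse]

lemma pv_no_slash_pkgs : ∀ q ∈ PACKAGES, '/' ∉ q.toList := by decide

-- B's guard holds exactly on the shape "src/<pkg>/<t>"
lemma pv_shape_split (p : String) (t : List Char) (fp : String) (hp : '/' ∉ p.toList)
    (hfp : pvShape fp p t) :
    fp.toList.splitOn '/' = "src".toList :: p.toList :: t.splitOn '/' := by
  have : fp.toList = "src".toList ++ '/' :: (p.toList ++ '/' :: t) := by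
    rw [hfp]; rfl
  rw [this, pv_splitOn_noSlash_append _ _ (by decide), pv_splitOn_noSlash_append _ _ hp]

lemma pv_startswith_iff (fp q : String) :
    PySem.Str.startswith fp ("src/" ++ q ++ "/") = true ↔
      ∃ u, fp.toList = ['s', 'r', 'c', '/'] ++ q.toList ++ '/' :: u := by
  rw [PySem.Str.startswith_eq, PySem.Chars.startswith_iff]
  constructor
  · rintro ⟨u, hu⟩
    refine ⟨u, ?_⟩
    rw [← hu]
    simp [String.toList_append]
  · rintro ⟨u, hu⟩
    refine ⟨u, ?_⟩
    rw [hu]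
    simp [String.toList_append]

lemma pv_loop_hit (fp s p : String) (t : List Char) (l : List String)
    (hl : ∀ q ∈ l, '/' ∉ q.toList) (hpn : '/' ∉ p.toList) (hp : p ∈ l)
    (hfp : pvShape fp p t) :
    pkgLoop fp s l = "src/" ++ p ++ s ++ "/" ++ String.ofList t := by
  induction l with
  | nil => cases hp
  | cons q l' ih =>
    by_cases hq : q = p
    · subst hq
      have hsw : PySem.Str.startswith fp ("src/" ++ q ++ "/") = true :=
        (pv_startswith_iff fp q).mpr ⟨t, hfp⟩
      have hslice : PySem.Str.slice fp (some (PySem.Str.len ("src/" ++ q ++ "/"))) none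
          = String.ofList t := by
        apply String.toList_inj.mp
        rw [PySem.Str.toList_slice, PySem.Chars.slice_eq_listSlice, PySem.Str.len_eq,
          PySem.List.slice_from _ (by positivity), Int.toNat_natCast]
        have h2 : fp.toList = ("src/" ++ q ++ "/").toList ++ t := by
          rw [hfp]; simp [String.toList_append]
        rw [h2, List.drop_left]
        simp
      simp only [pkgLoop, hsw, if_pos, hslice]
    · have hswf : PySem.Str.startswith fp ("src/" ++ q ++ "/") = false := by
        rw [Bool.eq_false_iff]
        intro hsw
        obtain ⟨u, hu⟩ := (pv_startswith_iff fp q).mp hsw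
        rw [hfp] at hu
        have h4 : q.toList ++ '/' :: u = p.toList ++ '/' :: t := by
          have := hu.symm
          simpa [List.append_assoc] using this
        have := pv_noSlash_eq _ _ _ _ (hl q (List.mem_cons_self ..)) hpn h4
        exact hq (String.toList_inj.mp this.1)
      have hp' : p ∈ l' := by
        rcases List.mem_cons.mp hp with h | h
        · exact absurd h.symm hq
        · exact h
      simp only [pkgLoop, hswf, Bool.false_eq_true, if_false]
      exact ih (fun r hr => hl r (List.mem_cons_of_mem _ hr)) hp'

lemma pv_loop_miss (fp s : String) (l : List String)
    (h : ∀ q ∈ l, ∀ u, fp.toList ≠ ['s', 'r', 'c', '/'] ++ q.toList ++ '/' :: u) :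
    pkgLoop fp s l = fp := by
  induction l with
  | nil => rfl
  | cons q l' ih =>
    have hswf : PySem.Str.startswith fp ("src/" ++ q ++ "/") = false := by
      rw [Bool.eq_false_iff]
      intro hsw
      obtain ⟨u, hu⟩ := (pv_startswith_iff fp q).mp hsw
      exact h q (List.mem_cons_self ..) u hu
    simp only [pkgLoop, hswf, Bool.false_eq_true, if_false]
    exact ih (fun r hr => h r (List.mem_cons_of_mem _ hr))

lemma pv_pkg_toList_mem (p : String) (hp : p ∈ PACKAGES) :
    p.toList ∈ (PySem.Set.ofList ["models".toList, "services".toList, "utils".toList, "unused".toList] : PySem.Set (List Char)) := by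
  simp only [PACKAGES, List.mem_cons, List.not_mem_nil, or_false] at hp
  rcases hp with h | h | h | h <;> (subst h; decide)

lemma pv_pkg_toList_mem_inv (b : List Char)
    (hb : b ∈ (PySem.Set.ofList ["models".toList, "services".toList, "utils".toList, "unused".toList] : PySem.Set (List Char))) :
    ∃ p ∈ PACKAGES, b = p.toList := by
  have hb' : b = "models".toList ∨ b = "services".toList ∨ b = "utils".toList ∨ b = "unused".toList := by
    rw [PySem.Set.mem_ofList] at hb
    simpa using hb
  rcases hb' with h | h | h | h
  · exact ⟨"models", by decide, h⟩
  · exact ⟨"services", by decide, h⟩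
  · exact ⟨"utils", by decide, h⟩
  · exact ⟨"unused", by decide, h⟩

-- ===== VERDICT (by name: the statement is the Claim_ definition above) =====
theorem rewrite_js_file_spec : Claim_equal_rewrite_js_file := by
  intro fp i _
  unfold Spec_rewrite_js_file rewrite_js_file rewrite_js_file_alt sfx
  by_cases hidx : (fp == "src/index.js") = true
  · simp only [hidx, if_pos]
  · simp only [Bool.not_eq_true] at hidx
    simp only [hidx, Bool.false_eq_true, if_false]
    by_cases hE : ∃ p ∈ PACKAGES, ∃ t : List Char, pvShape fp p t
    · obtain ⟨p, hpmem, t, hfp⟩ := hE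
      have hpn : '/' ∉ p.toList := pv_no_slash_pkgs p hpmem
      have hsplit := pv_shape_split p t fp hpn hfp
      have hA := pv_loop_hit fp (sfx i) p t PACKAGES pv_no_slash_pkgs hpn hpmem hfp
      have hne : t.splitOn '/' ≠ [] := List.splitOnP_ne_nil _ _
      obtain ⟨r, rs, hrs⟩ := List.exists_cons_of_ne_nil hne
      have hC : 3 ≤ (fp.toList.splitOn '/').length ∧
          (fp.toList.splitOn '/').getD 0 [] = "src".toList ∧
          (fp.toList.splitOn '/').getD 1 [] ∈
            (PySem.Set.ofList ["models".toList, "services".toList, "utils".toList, "unused".toList] : PySem.Set (List Char)) := by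
        refine ⟨?_, ?_, ?_⟩
        · rw [hsplit, hrs]; simp
        · rw [hsplit]; rfl
        · rw [hsplit]
          exact pv_pkg_toList_mem p hpmem
      rw [if_pos hC, hsplit]
      have hgd : ("src".toList :: p.toList :: t.splitOn '/').getD 1 [] = p.toList := rfl
      have hdrop : ("src".toList :: p.toList :: t.splitOn '/').drop 2 = t.splitOn '/' := rfl
      have hjoin : List.intercalate ['/'] (t.splitOn '/') = t := List.intercalate_splitOn t '/'
      unfold sfx at hA
      rw [hgd, hdrop, hjoin, hA, String.ofList_toList]
    · push_neg at hE
      have hA := pv_loop_miss fp (sfx i) PACKAGES (by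
        intro q hq u hu
        exact hE q hq u hu)
      have hnC : ¬ (3 ≤ (fp.toList.splitOn '/').length ∧
          (fp.toList.splitOn '/').getD 0 [] = "src".toList ∧
          (fp.toList.splitOn '/').getD 1 [] ∈
            (PySem.Set.ofList ["models".toList, "services".toList, "utils".toList, "unused".toList] : PySem.Set (List Char))) := by
        rintro ⟨hlen, h0, h1⟩
        obtain ⟨a, l1, hl1⟩ := List.exists_cons_of_ne_nil (List.splitOnP_ne_nil (· == '/') fp.toList)
        have hl1' : fp.toList.splitOn '/' = a :: l1 := hl1
        rcases l1 with _ | ⟨b, l2⟩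
        · rw [hl1'] at hlen; simp at hlen
        rcases l2 with _ | ⟨c, l3⟩
        · rw [hl1'] at hlen; simp at hlen
        obtain ⟨p, hpmem, hbp⟩ := pv_pkg_toList_mem_inv b (by rw [hl1'] at h1; exact h1)
        have ha : a = "src".toList := by rw [hl1'] at h0; exact h0
        have hrt : List.intercalate ['/'] (fp.toList.splitOn '/') = fp.toList := by
          have := List.intercalate_splitOn fp.toList '/'
          simpa [List.intercalate] using this
        have hfp' : fp.toList = ['s', 'r', 'c', '/'] ++ p.toList ++ '/' :: List.intercalate ['/'] (c :: l3) := by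
          rw [← hrt, hl1', ha, ← hbp,
            pv_intercalate_cons _ _ (by simp), pv_intercalate_cons _ _ (by simp)]
          rfl
        exact hE p hpmem (List.intercalate ['/'] (c :: l3)) hfp'
      rw [if_neg hnC]
      exact hA
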